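-- pv_equiv track=rewrite | github.com/qality-tech/Web-Runner | Utils/Common/RulesHandler.py | get_attributes_from_format
-- ===== SOURCE A (Python) =====
-- def get_attributes_from_format(attribute_format):
--     """ Given a string format of an attribute, extracts the element of the format.
--
--         Parameters
--         ----------
--         attribute_format: String
--             format of an attribute (ex.: '{year}:{month}-{day}')
--
--         Returns
--         -------
--         list
--             a list of elements from format (ex.: ['year', 'month', 'day'])
--     """
--     format_attributes = []
--     last_bracket = None
--     attribute = ''
--     for index, c in enumerate(attribute_format):
--         if c not in ['{', '}']:
--             attribute = attribute + c
--         elif c == '{':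
--             last_bracket = c
--             attribute = ''
--         elif c == '}' and last_bracket == '{':
--             format_attributes.append(attribute)
--     return format_attributes
-- ===== SOURCE B (Python) =====
-- def get_attributes_from_format(attribute_format):
--     """Extract the attribute names enclosed in braces from a format string
--     (e.g. '{year}:{month}-{day}' -> ['year', 'month', 'day'])."""
--     attributes = []
--     for segment in attribute_format.split('{')[1:]:
--         name, closed, _ = segment.partition('}')
--         if closed:
--             attributes.append(name)
--     return attributes
-- ===== Notes on version B (the rewrite author's own statement) =====
-- stated objective: simpler
-- what changed: Replaces A's per-character state machine (last_bracket flag plus a character-by-character buffer) with a split-based decomposition: split on '{', drop the text before the first brace, and take each segment's text up to its closing brace.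
-- intended difference: On inputs where some '{'-opened region contains two or more '}' before the next '{', A appends its still-growing buffer at every extra '}' because last_bracket is never cleared (e.g. '{a}b}' -> ['a','ab']); B emits one attribute per opened region ('{a}b}' -> ['a']), which is the intended extraction of the format's elements. — e.g. on get_attributes_from_format("{a}b}"): A returns ["a", "ab"], B returns ["a"]
import Mathlib
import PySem

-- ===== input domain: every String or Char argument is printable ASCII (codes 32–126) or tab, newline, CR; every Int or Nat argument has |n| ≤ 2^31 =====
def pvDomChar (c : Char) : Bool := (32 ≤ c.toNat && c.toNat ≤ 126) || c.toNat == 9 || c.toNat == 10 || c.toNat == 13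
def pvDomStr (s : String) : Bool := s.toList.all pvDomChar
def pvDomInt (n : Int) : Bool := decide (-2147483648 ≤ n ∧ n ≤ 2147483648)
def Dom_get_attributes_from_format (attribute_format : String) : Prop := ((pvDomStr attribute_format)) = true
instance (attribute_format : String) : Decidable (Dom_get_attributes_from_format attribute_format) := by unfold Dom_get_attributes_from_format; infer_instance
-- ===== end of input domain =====

-- B replaces A's per-character state machine by a brace-split decomposition (simpler);
-- where a '{'-region holds several '}', A re-emits its growing buffer and B emits one name (D_ below).

-- ===== PORT A =====
-- per-character step of A's loop: state = (format_attributes, last_bracket, attribute)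
def pvStepA (st : List (List Char) × Option Char × List Char) (c : Char) :
    List (List Char) × Option Char × List Char :=
  if ¬ (c = '{' ∨ c = '}') then (st.1, st.2.1, st.2.2 ++ [c])
  else if c = '{' then (st.1, some '{', ([] : List Char))
  else if c = '}' ∧ st.2.1 = some '{' then (st.1 ++ [st.2.2], st.2.1, st.2.2)
  else st

def get_attributes_from_format (attribute_format : String) : List String :=
  ((attribute_format.toList.foldl pvStepA (([] : List (List Char)), (none : Option Char), ([] : List Char))).1).map String.mk

-- ===== PORT B =====
-- body of B's loop over attribute_format.split('{')[1:]:
-- name, closed, _ = segment.partition('}'); if closed: append(name)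
def pvSegB (out : List (List Char)) (seg : List Char) : List (List Char) :=
  if '}' ∈ seg then out ++ [seg.takeWhile (· ≠ '}')] else out

def get_attributes_from_format_alt (attribute_format : String) : List String :=
  ((((attribute_format.toList.splitOn '{').drop 1).foldl pvSegB []).map String.mk)

-- ===== PRECONDITION & SPEC =====
-- On inputs where some '{'-opened region contains two or more '}' before the next '{', A appends
-- its still-growing buffer at every extra '}' (last_bracket is never cleared: '{a}b}' → ['a','ab']);
-- B emits one attribute per opened region ('{a}b}' → ['a']), the intended extraction.
def D_get_attributes_from_format (attribute_format : String) : Prop :=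
  ∃ seg ∈ (attribute_format.toList.splitOn '{').drop 1, 2 ≤ seg.count '}'
instance (attribute_format : String) : Decidable (D_get_attributes_from_format attribute_format) := by
  unfold D_get_attributes_from_format; infer_instance

def Spec_get_attributes_from_format (attribute_format : String) (out : List String) : Prop :=
  ¬ D_get_attributes_from_format attribute_format → out = get_attributes_from_format_alt attribute_format
instance (attribute_format : String) (out : List String) : Decidable (Spec_get_attributes_from_format attribute_format out) := by
  unfold Spec_get_attributes_from_format; infer_instance

def pvDiffWitness_get_attributes_from_format : String := "{a}b}"
def pvDiffWitnessOut_get_attributes_from_format : (List String) × (List String) := (["a", "ab"], ["a"])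

-- ===== CLAIM =====
def Claim_unchanged_get_attributes_from_format : Prop := ∀ (attribute_format : String), Dom_get_attributes_from_format attribute_format → Spec_get_attributes_from_format attribute_format (get_attributes_from_format attribute_format)
def Claim_changed_get_attributes_from_format : Prop := Dom_get_attributes_from_format (pvDiffWitness_get_attributes_from_format) ∧ D_get_attributes_from_format (pvDiffWitness_get_attributes_from_format) ∧ get_attributes_from_format (pvDiffWitness_get_attributes_from_format) = pvDiffWitnessOut_get_attributes_from_format.1 ∧ get_attributes_from_format_alt (pvDiffWitness_get_attributes_from_format) = pvDiffWitnessOut_get_attributes_from_format.2 ∧ pvDiffWitnessOut_get_attributes_from_format.1 ≠ pvDiffWitnessOut_get_attributes_from_format.2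
def Claim_exact_get_attributes_from_format : Prop := ∀ (attribute_format : String), Dom_get_attributes_from_format attribute_format → D_get_attributes_from_format attribute_format → get_attributes_from_format attribute_format ≠ get_attributes_from_format_alt attribute_format

-- ===== LEMMAS AND PROOFS =====

-- A's loop, rephrased segment-wise: a running accumulator emitted at every '}' of a segment
def pvInner (p : List (List Char) × List Char) (piece : List Char) :
    List (List Char) × List Char :=
  (p.1 ++ [p.2 ++ piece], p.2 ++ piece)

def pvSegLoop (out : List (List Char)) (seg : List Char) : List (List Char) :=
  (((seg.splitOn '}').dropLast).foldl pvInner (out, ([] : List Char))).1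

lemma pvSplitOn_ne_nil (cs : List Char) (a : Char) : cs.splitOn a ≠ [] := by
  simp [List.splitOn]; exact List.splitOnP_ne_nil _ cs

lemma pvSplitOn_cons (c a : Char) (cs : List Char) :
    (c :: cs).splitOn a =
      if c = a then [] :: cs.splitOn a else (cs.splitOn a).modifyHead (c :: ·) := by
  simp [List.splitOn, List.splitOnP_cons]

lemma pvTail_modifyHead {α : Type} (f : α → α) (L : List α) :
    (L.modifyHead f).tail = L.tail := by cases L <;> simp

lemma pvHeadI_modifyHead {α : Type} [Inhabited α] (f : α → α) (L : List α) (h : L ≠ []) :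
    (L.modifyHead f).headI = f L.headI := by cases L <;> simp_all

-- prepending a char to the head piece = starting the accumulator with that char
lemma pvFold_modifyHead (L : List (List Char)) (out : List (List Char)) (acc : List Char) (c : Char) :
    ((((L.modifyHead (c :: ·)).dropLast).foldl pvInner (out, acc)).1) =
    ((L.dropLast).foldl pvInner (out, acc ++ [c])).1 := by
  match L with
  | [] => simp
  | [p] => simp
  | p :: q :: r =>
      simp only [List.modifyHead_cons, List.dropLast_cons₂, List.foldl_cons]
      have : pvInner (out, acc) (c :: p) = pvInner (out, acc ++ [c]) p := by
        simp [pvInner]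
      rw [this]

-- the '{'-seen phase of A equals the segment-wise accumulator loop
lemma pvPhaseSome (cs : List Char) : ∀ (out : List (List Char)) (acc : List Char),
    (cs.foldl pvStepA (out, some '{', acc)).1 =
      ((cs.splitOn '{').tail).foldl pvSegLoop
        ((((((cs.splitOn '{').headI).splitOn '}').dropLast).foldl pvInner (out, acc)).1) := by
  induction cs with
  | nil => intro out acc; simp [List.splitOn]
  | cons c cs ih =>
      intro out acc
      by_cases h1 : c = '{'
      · subst h1
        have hstep : (List.foldl pvStepA (out, some '{', acc) ('{' :: cs)) =
            List.foldl pvStepA (out, some '{', ([] : List Char)) cs := by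
          simp [pvStepA]
        obtain ⟨s0, segs, hL⟩ : ∃ s0 segs, cs.splitOn '{' = s0 :: segs := by
          cases h : cs.splitOn '{' with
          | nil => exact absurd h (pvSplitOn_ne_nil cs '{')
          | cons a b => exact ⟨a, b, rfl⟩
        rw [hstep, ih out [], pvSplitOn_cons, hL]
        simp [pvSegLoop, List.splitOn]
      · by_cases h2 : c = '}'
        · subst h2
          have hstep : (List.foldl pvStepA (out, some '{', acc) ('}' :: cs)) =
              List.foldl pvStepA (out ++ [acc], some '{', acc) cs := by
            simp [pvStepA]
          rw [hstep, ih (out ++ [acc]) acc, pvSplitOn_cons]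
          simp only [if_neg h1, pvTail_modifyHead,
            pvHeadI_modifyHead _ _ (pvSplitOn_ne_nil cs '{')]
          rw [pvSplitOn_cons]
          simp only [if_pos (rfl : '}' = '}')]
          have hne := pvSplitOn_ne_nil ((cs.splitOn '{').headI) '}'
          obtain ⟨p, r, hpr⟩ : ∃ p r, ((cs.splitOn '{').headI).splitOn '}' = p :: r := by
            cases h : ((cs.splitOn '{').headI).splitOn '}' with
            | nil => exact absurd h hne
            | cons a b => exact ⟨a, b, rfl⟩
          rw [hpr]
          simp [pvInner]
        · have hstep : (List.foldl pvStepA (out, some '{', acc) (c :: cs)) =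
              List.foldl pvStepA (out, some '{', acc ++ [c]) cs := by
            simp [pvStepA, h1, h2]
          rw [hstep, ih out (acc ++ [c]), pvSplitOn_cons]
          simp only [if_neg h1, pvTail_modifyHead,
            pvHeadI_modifyHead _ _ (pvSplitOn_ne_nil cs '{')]
          rw [pvSplitOn_cons]
          simp only [if_neg h2]
          rw [pvFold_modifyHead]

-- the before-first-'{' phase of A: nothing is emitted, everything before '{' is discarded
lemma pvPhaseNone (cs : List Char) : ∀ (out : List (List Char)) (attr : List Char),
    (cs.foldl pvStepA (out, none, attr)).1 =
      ((cs.splitOn '{').drop 1).foldl pvSegLoop out := by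
  induction cs with
  | nil => intro out attr; simp [List.splitOn]
  | cons c cs ih =>
      intro out attr
      by_cases h1 : c = '{'
      · subst h1
        have hstep : (List.foldl pvStepA (out, none, attr) ('{' :: cs)) =
            List.foldl pvStepA (out, some '{', ([] : List Char)) cs := by
          simp [pvStepA]
        rw [hstep, pvPhaseSome cs out []]
        rw [pvSplitOn_cons]
        simp only [if_pos rfl, List.drop_one, List.tail_cons]
        obtain ⟨s0, segs, hL⟩ : ∃ s0 segs, cs.splitOn '{' = s0 :: segs := by
          cases h : cs.splitOn '{' with
          | nil => exact absurd h (pvSplitOn_ne_nil cs '{')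
          | cons a b => exact ⟨a, b, rfl⟩
        rw [hL]
        simp [pvSegLoop]
      · have hstep : (List.foldl pvStepA (out, none, attr) (c :: cs)) =
            List.foldl pvStepA (out, none,
              if c = '}' then attr else attr ++ [c]) cs := by
          by_cases h2 : c = '}' <;> simp [pvStepA, h1, h2]
        rw [hstep, ih, pvSplitOn_cons]
        simp only [if_neg h1, List.drop_one, pvTail_modifyHead]

-- splitting a separator-free list is the identity segment
lemma pvSplitOn_not_mem (l : List Char) (a : Char) (h : a ∉ l) : l.splitOn a = [l] := by
  induction l with
  | nil => simp [List.splitOn]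
  | cons c cs ih =>
      rw [pvSplitOn_cons]
      simp only [List.mem_cons, not_or] at h
      rw [if_neg (fun hh => h.1 (Eq.symm hh)), ih h.2]
      simp

-- a first separator splits off the prefix
lemma pvSplitOn_first (p q : List Char) (hp : '}' ∉ p) :
    ((p ++ '}' :: q).splitOn '}') = p :: q.splitOn '}' := by
  induction p with
  | nil => simp [pvSplitOn_cons]
  | cons c cs ih =>
      simp only [List.mem_cons, not_or] at hp
      simp only [List.cons_append, pvSplitOn_cons,
        if_neg (fun hh => hp.1 (Eq.symm hh)), ih hp.2]
      simp

lemma pvTakeWhile_first (p q : List Char) (hp : '}' ∉ p) :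
    (p ++ '}' :: q).takeWhile (· ≠ '}') = p := by
  induction p with
  | nil => simp [List.takeWhile]
  | cons c cs ih =>
      simp only [List.mem_cons, not_or] at hp
      have hc : ¬ c = '}' := fun hh => hp.1 (Eq.symm hh)
      simp only [List.cons_append, List.takeWhile_cons]
      simp [hc]
      simpa using ih hp.2

lemma pvMem_split (seg : List Char) (h : '}' ∈ seg) :
    ∃ p q, seg = p ++ '}' :: q ∧ '}' ∉ p ∧ seg.count '}' = q.count '}' + 1 := by
  induction seg with
  | nil => cases h
  | cons c cs ih =>
      by_cases hc : c = '}'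
      · subst hc
        exact ⟨[], cs, by simp, by simp, by simp⟩
      · have hm : '}' ∈ cs := by cases h with
          | head => exact absurd rfl hc
          | tail _ h => exact h
        obtain ⟨p, q, h1, h2, h3⟩ := ih hm
        refine ⟨c :: p, q, by simp [h1], ?_, ?_⟩
        · simp only [List.mem_cons, not_or]
          exact ⟨fun hh => hc (Eq.symm hh), h2⟩
        · simp [h1, List.count_cons, hc] at *
          omega

-- a segment with at most one '}' : the accumulator loop collapses to B's step
lemma pvSeg_eq (seg : List Char) (out : List (List Char)) (h : seg.count '}' ≤ 1) :
    pvSegLoop out seg = pvSegB out seg := by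
  by_cases hm : '}' ∈ seg
  · obtain ⟨p, q, h1, h2, h3⟩ := pvMem_split seg hm
    have hq : '}' ∉ q := by
      rw [h3] at h
      exact List.count_eq_zero.mp (by omega)
    subst h1
    rw [pvSegLoop, pvSplitOn_first p q h2, pvSplitOn_not_mem q '}' hq]
    rw [pvSegB, if_pos hm, pvTakeWhile_first p q h2]
    simp [pvInner]
  · rw [pvSegLoop, pvSplitOn_not_mem seg '}' hm]
    simp [pvSegB, hm]

-- lengths, for the tightness claim
lemma pvCount_splitOn (l : List Char) (a : Char) :
    (l.splitOn a).length = l.count a + 1 := by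
  induction l with
  | nil => simp [List.splitOn]
  | cons c cs ih =>
      rw [pvSplitOn_cons, List.count_cons]
      by_cases hc : c = a
      · simp [hc, ih]
      · simp [hc, ih]

lemma pvInner_len (L : List (List Char)) : ∀ (out : List (List Char)) (acc : List Char),
    ((L.foldl pvInner (out, acc)).1).length = out.length + L.length := by
  induction L with
  | nil => intro out acc; simp
  | cons p r ih =>
      intro out acc
      simp only [List.foldl_cons, pvInner]
      rw [ih]
      simp; omega

lemma pvSegLoop_len (out : List (List Char)) (seg : List Char) :
    (pvSegLoop out seg).length = out.length + seg.count '}' := by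
  rw [pvSegLoop, pvInner_len]
  have := pvCount_splitOn seg '}'
  simp [List.length_dropLast]
  omega

lemma pvSegB_len (out : List (List Char)) (seg : List Char) :
    (pvSegB out seg).length = out.length + (if '}' ∈ seg then 1 else 0) := by
  rw [pvSegB]; split_ifs <;> simp

lemma pvLoopA_len (segs : List (List Char)) : ∀ (out : List (List Char)),
    ((segs.foldl pvSegLoop out).length : Int) =
      out.length + (segs.map (fun g => (g.count '}' : Int))).sum := by
  induction segs with
  | nil => intro out; simp
  | cons g r ih =>
      intro out
      simp only [List.foldl_cons, List.map_cons, List.sum_cons]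
      rw [ih, pvSegLoop_len]
      push_cast
      ring

lemma pvLoopB_len (segs : List (List Char)) : ∀ (out : List (List Char)),
    ((segs.foldl pvSegB out).length : Int) =
      out.length + (segs.map (fun g => if '}' ∈ g then (1 : Int) else 0)).sum := by
  induction segs with
  | nil => intro out; simp
  | cons g r ih =>
      intro out
      simp only [List.foldl_cons, List.map_cons, List.sum_cons]
      rw [ih, pvSegB_len]
      split_ifs <;> (push_cast; ring)

lemma pvSum_lt (segs : List (List Char)) (g0 : List Char) (hmem : g0 ∈ segs)
    (h2 : 2 ≤ g0.count '}') :
    (segs.map (fun seg => if '}' ∈ seg then (1 : Int) else 0)).sum <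
      (segs.map (fun seg => (seg.count '}' : Int))).sum := by
  have hle : ∀ gg : List Char,
      (if '}' ∈ gg then (1 : Int) else 0) ≤ (gg.count '}' : Int) := by
    intro gg; split_ifs with h
    · exact_mod_cast Nat.one_le_iff_ne_zero.mpr (by simpa [List.count_eq_zero] using h)
    · positivity
  have hsumle : ∀ (l : List (List Char)),
      (l.map (fun seg => if '}' ∈ seg then (1 : Int) else 0)).sum ≤
        (l.map (fun seg => (seg.count '}' : Int))).sum := by
    intro l
    induction l with
    | nil => simp
    | cons x xs ihx =>
        simp only [List.map_cons, List.sum_cons]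
        exact add_le_add (hle x) ihx
  induction hmem with
  | head r =>
      simp only [List.map_cons, List.sum_cons]
      have hg : (if '}' ∈ g0 then (1 : Int) else 0) < (g0.count '}' : Int) := by
        have h2' : (2 : Int) ≤ (g0.count '}' : Int) := by exact_mod_cast h2
        split_ifs <;> omega
      exact add_lt_add_of_lt_of_le hg (hsumle r)
  | tail b hmem ih =>
      simp only [List.map_cons, List.sum_cons]
      exact add_lt_add_of_le_of_lt (hle b) ih

-- outside D_, every segment has at most one '}', so the two loops agree
lemma pvFold_congr (L : List (List Char)) (h : ∀ seg ∈ L, seg.count '}' ≤ 1) :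
    ∀ out : List (List Char), L.foldl pvSegLoop out = L.foldl pvSegB out := by
  induction L with
  | nil => intro out; rfl
  | cons g r ih =>
      intro out
      simp only [List.foldl_cons]
      rw [pvSeg_eq g out (h g (List.mem_cons_self))]
      exact ih (fun seg hm => h seg (List.mem_cons_of_mem _ hm)) _

-- ===== VERDICT =====
theorem get_attributes_from_format_spec : Claim_unchanged_get_attributes_from_format := by
  intro s _ hnD
  unfold get_attributes_from_format get_attributes_from_format_alt
  rw [pvPhaseNone]
  congr 1
  have hseg : ∀ seg ∈ (s.toList.splitOn '{').drop 1, seg.count '}' ≤ 1 := by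
    intro seg hmem
    by_contra h
    exact hnD ⟨seg, hmem, by omega⟩
  exact pvFold_congr _ hseg []

theorem get_attributes_from_format_changed : Claim_changed_get_attributes_from_format := by
  unfold Claim_changed_get_attributes_from_format; decide

theorem get_attributes_from_format_tight : Claim_exact_get_attributes_from_format := by
  intro s _ hD heq
  obtain ⟨g0, hmem, h2⟩ := hD
  have hlen := congrArg List.length heq
  unfold get_attributes_from_format get_attributes_from_format_alt at hlen
  rw [pvPhaseNone] at hlen
  simp only [List.length_map] at hlen
  have hA := pvLoopA_len ((s.toList.splitOn '{').drop 1) []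
  have hB := pvLoopB_len ((s.toList.splitOn '{').drop 1) []
  have hlt := pvSum_lt ((s.toList.splitOn '{').drop 1) g0 hmem h2
  rw [hlen] at hA
  simp only [List.length_nil, Nat.cast_zero, zero_add] at hA hB
  omega
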